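-- pv_equiv track=rewrite | github.com/Umang-Lodaya/GeeksForGeeks-Problems | Easy/Exit Point in a Matrix/exit-point-in-a-matrix.py | FindExitPoint
-- ===== SOURCE A (Python) =====
-- def FindExitPoint(n, m, matrix):
--     prow = -1
--     pcol = -1
--     row = 0
--     col = 0
--
--     while 0 <= row < n and 0 <= col < m:
--         slope_r = row - prow
--         slope_c = col - pcol
--
--         prow = row
--         pcol = col
--
--         if matrix[row][col]==0 and slope_r==1 and slope_c==1:
--             row = row
--             col = col+1;
--
--         elif matrix[row][col]==1 and slope_r==1 and slope_c==1:
--             matrix[row][col] = 0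
--             row = row+1;
--             col = col
--
--         else:
--             if matrix[row][col]==0:
--                 if slope_r == 0 and slope_c==1:
--                     row = row;
--                     col = col+1;
--
--                 elif slope_r==1 and slope_c==0:
--                     row+=1;
--                     col = col
--
--                 elif slope_r==0 and slope_c == -1:
--                     row = row;
--                     col-=1;
--
--                 else:
--                     row-=1;
--                     col = col;
--
--             else:
--                 matrix[row][col] = 0
--                 if slope_r == 0 and slope_c==1:
--                     row = row+1;
--                     col = col;
--
--                 elif slope_r==1 and slope_c==0:
--                     row=row;
--                     col = col-1
--
--                 elif slope_r==0 and slope_c == -1: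
--                     row = row-1;
--                     col=col;
--
--                 else:
--                     row = row;
--                     col = col+1;
--
--     return [prow , pcol]
-- ===== SOURCE B (Python) =====
-- # B: instead of stepping cell by cell, index the obstacles once per row and per
-- # column, then jump straight from obstacle to obstacle (A also mutates `matrix`
-- # in place; B does not — the equivalence claimed is about the return value only).
-- def FindExitPoint(n, m, matrix):
--     if n <= 0 or m <= 0:
--         return [-1, -1]
--     rows = [[c for c in range(m) if matrix[r][c] != 0] for r in range(n)]
--     cols = [[r for r in range(n) if matrix[r][c] != 0] for c in range(m)]
--     v = matrix[0][0]
--     if v != 0: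
--         rows[0].remove(0)
--         cols[0].remove(0)
--     # A's rule at the start cell: a 1 deflects the beam down, anything else lets it go right
--     r, c, d = 0, 0, (1 if v == 1 else 0)
--     while True:
--         if d == 0:  # right
--             nxt = min((x for x in rows[r] if x > c), default=None)
--             if nxt is None:
--                 return [r, m - 1]
--             c, d = nxt, 1
--         elif d == 1:  # down
--             nxt = min((x for x in cols[c] if x > r), default=None)
--             if nxt is None:
--                 return [n - 1, c]
--             r, d = nxt, 2
--         elif d == 2:  # left
--             nxt = max((x for x in rows[r] if x < c), default=None)
--             if nxt is None:
--                 return [r, 0]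
--             c, d = nxt, 3
--         else:  # up
--             nxt = max((x for x in cols[c] if x < r), default=None)
--             if nxt is None:
--                 return [0, c]
--             r, d = nxt, 0
--         rows[r].remove(c)
--         cols[c].remove(r)
-- ===== Notes on version B (the rewrite author's own statement) =====
-- stated objective: alternative
-- what changed: B builds per-row and per-column obstacle index lists once and jumps the beam straight from obstacle to obstacle (deleting each hit obstacle from the indexes), instead of A's cell-by-cell stepping driven by slope state and in-place matrix mutation; the equivalence is about the return value (A mutates matrix, B does not).
-- outside the precondition, e.g. on FindExitPoint(1, 2, [[1]]): A returns [0, 0], B raises IndexError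
import Mathlib
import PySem

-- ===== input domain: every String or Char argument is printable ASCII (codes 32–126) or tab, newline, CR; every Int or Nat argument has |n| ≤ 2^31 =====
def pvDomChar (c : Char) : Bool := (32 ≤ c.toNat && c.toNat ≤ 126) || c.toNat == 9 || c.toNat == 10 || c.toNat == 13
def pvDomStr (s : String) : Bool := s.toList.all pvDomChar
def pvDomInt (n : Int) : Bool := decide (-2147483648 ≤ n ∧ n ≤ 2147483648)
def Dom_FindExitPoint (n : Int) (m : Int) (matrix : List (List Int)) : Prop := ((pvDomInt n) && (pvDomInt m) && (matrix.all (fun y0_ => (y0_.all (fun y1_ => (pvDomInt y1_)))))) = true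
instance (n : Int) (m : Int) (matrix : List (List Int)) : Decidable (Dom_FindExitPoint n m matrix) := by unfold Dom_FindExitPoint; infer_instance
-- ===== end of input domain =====

-- B changes the algorithm: it indexes the obstacles (nonzero cells) per row and per column once
-- and jumps the beam straight from obstacle to obstacle instead of stepping cell by cell.
-- A mutates `matrix` in place (clears every obstacle it hits); B does not — the equivalence
-- proved here is about the RETURN value only.

-- ===== PORT A =====
-- matrix[r][c]  (in range wherever A reads it, under Pre_)
def pvCellA (mat : List (List Int)) (r c : Int) : Int :=
  PySem.List.pyGetD (PySem.List.pyGetD mat r []) c 0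

-- matrix[r][c] = 0
def pvClearA (mat : List (List Int)) (r c : Int) : List (List Int) :=
  PySem.List.pySetD mat r (PySem.List.pySetD (PySem.List.pyGetD mat r []) c 0)

-- the while loop of A; fuel is an upper bound on the number of iterations
-- (pvFuelA below is provably sufficient: each obstacle is hit at most once)
def pvLoopA (n m : Int) : Nat → Int → Int → Int → Int → List (List Int) → List Int
  | 0, prow, pcol, _, _, _ => [prow, pcol]   -- unreachable with the fuel FindExitPoint passes
  | fuel+1, prow, pcol, row, col, mat =>
    if 0 ≤ row ∧ row < n ∧ 0 ≤ col ∧ col < m then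
      let slope_r := row - prow
      let slope_c := col - pcol
      let v := pvCellA mat row col
      if v = 0 ∧ slope_r = 1 ∧ slope_c = 1 then
        pvLoopA n m fuel row col row (col + 1) mat
      else if v = 1 ∧ slope_r = 1 ∧ slope_c = 1 then
        pvLoopA n m fuel row col (row + 1) col (pvClearA mat row col)
      else
        if v = 0 then
          if slope_r = 0 ∧ slope_c = 1 then pvLoopA n m fuel row col row (col + 1) mat
          else if slope_r = 1 ∧ slope_c = 0 then pvLoopA n m fuel row col (row + 1) col mat
          else if slope_r = 0 ∧ slope_c = -1 then pvLoopA n m fuel row col row (col - 1) mat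
          else pvLoopA n m fuel row col (row - 1) col mat
        else
          let mat' := pvClearA mat row col
          if slope_r = 0 ∧ slope_c = 1 then pvLoopA n m fuel row col (row + 1) col mat'
          else if slope_r = 1 ∧ slope_c = 0 then pvLoopA n m fuel row col row (col - 1) mat'
          else if slope_r = 0 ∧ slope_c = -1 then pvLoopA n m fuel row col (row - 1) col mat'
          else pvLoopA n m fuel row col row (col + 1) mat'
    else [prow, pcol]

def pvFuelA (n m : Int) : Nat := (n.toNat * m.toNat + 2) * (n.toNat + m.toNat + 2)

def FindExitPoint (n : Int) (m : Int) (matrix : List (List Int)) : List Int :=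
  pvLoopA n m (pvFuelA n m) (-1) (-1) 0 0 matrix

-- ===== PORT B =====
-- (matrix[r][c] is read with the same helper pvCellA as in port A)

-- min((x for x in l if x > b), default=None)
def pvMinAbove (l : List Int) (b : Int) : Option Int :=
  PySem.List.min? (l.filter (fun x => decide (b < x))) (fun x => x)

-- max((x for x in l if x < b), default=None)
def pvMaxBelow (l : List Int) (b : Int) : Option Int :=
  PySem.List.max? (l.filter (fun x => decide (x < b))) (fun x => x)

-- ls[i].remove(v)  (v is provably present wherever B calls this; Python would raise otherwise)
def pvRemoveAt (ls : List (List Int)) (i v : Int) : List (List Int) :=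
  PySem.List.pySetD ls i ((PySem.List.remove? (PySem.List.pyGetD ls i []) v).getD (PySem.List.pyGetD ls i []))

-- the while loop of B: jump to the next obstacle in the current direction, delete it, turn
-- clockwise; fuel = number of indexed obstacles + 1 is sufficient (each jump deletes one)
def pvLoopB (n m : Int) : Nat → Int → Int → Int → List (List Int) → List (List Int) → List Int
  | 0, r, c, _, _, _ => [r, c]   -- unreachable with the fuel FindExitPoint_alt passes
  | fuel+1, r, c, d, rows, cols =>
    if d = 0 then       -- right
      match pvMinAbove (PySem.List.pyGetD rows r []) c with
      | none => [r, m - 1]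
      | some nxt => pvLoopB n m fuel r nxt 1 (pvRemoveAt rows r nxt) (pvRemoveAt cols nxt r)
    else if d = 1 then  -- down
      match pvMinAbove (PySem.List.pyGetD cols c []) r with
      | none => [n - 1, c]
      | some nxt => pvLoopB n m fuel nxt c 2 (pvRemoveAt rows nxt c) (pvRemoveAt cols c nxt)
    else if d = 2 then  -- left
      match pvMaxBelow (PySem.List.pyGetD rows r []) c with
      | none => [r, 0]
      | some nxt => pvLoopB n m fuel r nxt 3 (pvRemoveAt rows r nxt) (pvRemoveAt cols nxt r)
    else                -- up
      match pvMaxBelow (PySem.List.pyGetD cols c []) r with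
      | none => [0, c]
      | some nxt => pvLoopB n m fuel nxt c 0 (pvRemoveAt rows nxt c) (pvRemoveAt cols c nxt)

def FindExitPoint_alt (n : Int) (m : Int) (matrix : List (List Int)) : List Int :=
  if n ≤ 0 ∨ m ≤ 0 then [-1, -1]
  else
    let rows0 := (PySem.List.pyRange 0 n 1).map
      (fun r => (PySem.List.pyRange 0 m 1).filter (fun c => decide (pvCellA matrix r c ≠ 0)))
    let cols0 := (PySem.List.pyRange 0 m 1).map
      (fun c => (PySem.List.pyRange 0 n 1).filter (fun r => decide (pvCellA matrix r c ≠ 0)))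
    let v := pvCellA matrix 0 0
    let rows := if v ≠ 0 then pvRemoveAt rows0 0 0 else rows0
    let cols := if v ≠ 0 then pvRemoveAt cols0 0 0 else cols0
    -- A's rule at the start cell: a 1 deflects the beam down, anything else lets it go right
    let d : Int := if v = 1 then 1 else 0
    pvLoopB n m (n.toNat * m.toNat + 1) 0 0 d rows cols

-- ===== PRECONDITION & SPEC =====
-- Pre_ asks for a full n×m shape; this also excludes some ragged inputs on which A happens to
-- return because the beam exits before reaching a missing cell (cited in claim.json).
def Pre_FindExitPoint (n : Int) (m : Int) (matrix : List (List Int)) : Prop :=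
  0 < n → 0 < m → (n ≤ matrix.length ∧ ∀ row ∈ matrix.take n.toNat, m ≤ row.length)

instance (n : Int) (m : Int) (matrix : List (List Int)) : Decidable (Pre_FindExitPoint n m matrix) := by
  unfold Pre_FindExitPoint; infer_instance

def pvWitness_FindExitPoint : Int × Int × List (List Int) := (2, 2, [[0, 1], [1, 0]])

def Spec_FindExitPoint (n : Int) (m : Int) (matrix : List (List Int)) (out : List Int) : Prop := out = FindExitPoint_alt n m matrix
instance (n : Int) (m : Int) (matrix : List (List Int)) (out : List Int) : Decidable (Spec_FindExitPoint n m matrix out) := by unfold Spec_FindExitPoint; infer_instance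

-- ===== CLAIM (what is proved, stated in full; the proofs are below) =====
def Claim_equal_FindExitPoint : Prop := ∀ (n : Int) (m : Int) (matrix : List (List Int)), Dom_FindExitPoint n m matrix → Pre_FindExitPoint n m matrix → Spec_FindExitPoint n m matrix (FindExitPoint n m matrix)

-- ===== LEMMAS AND PROOFS =====

-- direction deltas: 0 = right, 1 = down, 2 = left, 3 = up
def pvDr (d : Int) : Int := if d = 0 then 0 else if d = 1 then 1 else if d = 2 then 0 else -1
def pvDc (d : Int) : Int := if d = 0 then 1 else if d = 1 then 0 else if d = 2 then -1 else 0

-- the matrix has a full n×m prefix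
def pvShape (n m : Int) (mat : List (List Int)) : Prop :=
  n.toNat ≤ mat.length ∧ ∀ i : Nat, i < n.toNat → m.toNat ≤ (mat.getD i []).length

-- the index lists hold exactly the nonzero in-bounds cells of mat, without duplicates
def pvGood (n m : Int) (mat rows cols : List (List Int)) : Prop :=
  rows.length = n.toNat ∧ cols.length = m.toNat ∧
  (∀ r : Int, 0 ≤ r → r < n →
      (rows.getD r.toNat []).Nodup ∧
      ∀ x : Int, x ∈ rows.getD r.toNat [] ↔ 0 ≤ x ∧ x < m ∧ pvCellA mat r x ≠ 0) ∧
  (∀ c : Int, 0 ≤ c → c < m →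
      (cols.getD c.toNat []).Nodup ∧
      ∀ x : Int, x ∈ cols.getD c.toNat [] ↔ 0 ≤ x ∧ x < n ∧ pvCellA mat x c ≠ 0)

-- number of remaining obstacles
def pvOcnt (n m : Int) (mat : List (List Int)) : Nat :=
  ∑ i ∈ Finset.range n.toNat, ∑ j ∈ Finset.range m.toNat,
    (if pvCellA mat (i : Int) (j : Int) ≠ 0 then 1 else 0)

lemma pvGetD_nonneg {α : Type} (xs : List α) {i : Int} (d : α) (h : 0 ≤ i) :
    PySem.List.pyGetD xs i d = xs.getD i.toNat d := by
  simp [PySem.List.pyGetD, PySem.List.pyGet?_of_nonneg xs h, List.getD_eq_getElem?_getD]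

lemma getD_set_self {α : Type} (l : List α) (i : Nat) (x d : α) (h : i < l.length) :
    (l.set i x).getD i d = x := by
  rw [List.getD_eq_getElem?_getD, List.getElem?_set_self h]; rfl

lemma getD_set_ne {α : Type} (l : List α) {i j : Nat} (x d : α) (h : i ≠ j) :
    (l.set i x).getD j d = l.getD j d := by
  rw [List.getD_eq_getElem?_getD, List.getElem?_set_ne h, ← List.getD_eq_getElem?_getD]

lemma pvCellA_eq (mat : List (List Int)) {r c : Int} (hr : 0 ≤ r) (hc : 0 ≤ c) :
    pvCellA mat r c = (mat.getD r.toNat []).getD c.toNat 0 := by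
  rw [pvCellA, pvGetD_nonneg mat [] hr, pvGetD_nonneg _ 0 hc]

lemma pvClearA_eq (mat : List (List Int)) {r c : Int} (hr : 0 ≤ r) (hc : 0 ≤ c) :
    pvClearA mat r c = mat.set r.toNat ((mat.getD r.toNat []).set c.toNat 0) := by
  rw [pvClearA, PySem.List.pySetD_of_nonneg mat _ hr, PySem.List.pySetD_of_nonneg _ _ hc,
    pvGetD_nonneg mat [] hr]

lemma pvShape_clear {n m : Int} {mat : List (List Int)} {r c : Int}
    (hs : pvShape n m mat) (hr : 0 ≤ r) (hc : 0 ≤ c) :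
    pvShape n m (pvClearA mat r c) := by
  obtain ⟨h1, h2⟩ := hs
  rw [pvClearA_eq mat hr hc]
  refine ⟨by simpa using h1, fun i hi => ?_⟩
  rcases eq_or_ne r.toNat i with heq | hne
  · by_cases hlen : i < mat.length
    · rw [← heq, getD_set_self _ _ _ _ (by omega)]
      have := h2 r.toNat (by omega)
      simpa [heq] using this
    · rw [List.set_eq_of_length_le (by omega)]
      exact h2 i hi
  · rw [getD_set_ne _ _ _ hne]
    exact h2 i hi

lemma pvCellA_clear_same {n m : Int} {mat : List (List Int)} {r c : Int}
    (hs : pvShape n m mat) (hr0 : 0 ≤ r) (hrn : r < n) (hc0 : 0 ≤ c) (hcm : c < m) :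
    pvCellA (pvClearA mat r c) r c = 0 := by
  obtain ⟨h1, h2⟩ := hs
  have hrlen : r.toNat < mat.length := by omega
  have hclen : c.toNat < (mat.getD r.toNat []).length := by
    have := h2 r.toNat (by omega); omega
  rw [pvCellA_eq _ hr0 hc0, pvClearA_eq mat hr0 hc0,
    getD_set_self _ _ _ _ hrlen, getD_set_self _ _ _ _ hclen]

lemma pvCellA_clear_ne {mat : List (List Int)} {r c r' c' : Int}
    (hr : 0 ≤ r) (hc : 0 ≤ c) (hr' : 0 ≤ r') (hc' : 0 ≤ c')
    (hne : r' ≠ r ∨ c' ≠ c) :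
    pvCellA (pvClearA mat r c) r' c' = pvCellA mat r' c' := by
  rw [pvCellA_eq _ hr' hc', pvCellA_eq _ hr' hc', pvClearA_eq mat hr hc]
  rcases eq_or_ne r.toNat r'.toNat with heq | hner
  · have heqr : r = r' := by omega
    have hnec : c' ≠ c := by tauto
    by_cases hlen : r'.toNat < mat.length
    · rw [← heq, heqr, getD_set_self _ _ _ _ (by omega),
        getD_set_ne _ _ _ (by omega)]
    · rw [List.set_eq_of_length_le (by omega)]
  · rw [getD_set_ne _ _ _ hner]

lemma pvRemoveAt_eq {ls : List (List Int)} {i v : Int} (hi : 0 ≤ i)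
    (hv : v ∈ ls.getD i.toNat []) :
    pvRemoveAt ls i v = ls.set i.toNat ((ls.getD i.toNat []).erase v) := by
  rw [pvRemoveAt, pvGetD_nonneg ls [] hi, PySem.List.remove?_eq_some_erase _ v hv,
    PySem.List.pySetD_of_nonneg _ _ hi]
  rfl

lemma pvMinAbove_none {l : List Int} {b : Int} (h : pvMinAbove l b = none) :
    ∀ x ∈ l, ¬ b < x := by
  rw [pvMinAbove, PySem.List.min?_eq_none_iff] at h
  intro x hx hlt
  have : x ∈ l.filter (fun x => decide (b < x)) := List.mem_filter.mpr ⟨hx, by simpa using hlt⟩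
  simp [h] at this

lemma pvMinAbove_some {l : List Int} {b y : Int} (h : pvMinAbove l b = some y) :
    y ∈ l ∧ b < y ∧ ∀ x ∈ l, b < x → y ≤ x := by
  rw [pvMinAbove] at h
  have hmem := PySem.List.min?_mem h
  have hmin := PySem.List.min?_isMin h
  rw [List.mem_filter] at hmem
  exact ⟨hmem.1, by simpa using hmem.2,
    fun x hx hbx => hmin x (List.mem_filter.mpr ⟨hx, by simpa using hbx⟩)⟩

lemma pvMaxBelow_none {l : List Int} {b : Int} (h : pvMaxBelow l b = none) :
    ∀ x ∈ l, ¬ x < b := by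
  rw [pvMaxBelow, PySem.List.max?_eq_none_iff] at h
  intro x hx hlt
  have : x ∈ l.filter (fun x => decide (x < b)) := List.mem_filter.mpr ⟨hx, by simpa using hlt⟩
  simp [h] at this

lemma pvMaxBelow_some {l : List Int} {b y : Int} (h : pvMaxBelow l b = some y) :
    y ∈ l ∧ y < b ∧ ∀ x ∈ l, x < b → x ≤ y := by
  rw [pvMaxBelow] at h
  have hmem := PySem.List.max?_mem h
  have hmax := PySem.List.max?_isMax h
  rw [List.mem_filter] at hmem
  exact ⟨hmem.1, by simpa using hmem.2,
    fun x hx hbx => hmax x (List.mem_filter.mpr ⟨hx, by simpa using hbx⟩)⟩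

-- clearing a hit obstacle and deleting it from the indexes keeps the invariant
-- and decrements the obstacle count
lemma pvPreserve {n m : Int} {mat rows cols : List (List Int)} {r c : Int}
    (hs : pvShape n m mat) (hg : pvGood n m mat rows cols)
    (hr0 : 0 ≤ r) (hrn : r < n) (hc0 : 0 ≤ c) (hcm : c < m)
    (hv : pvCellA mat r c ≠ 0) :
    pvShape n m (pvClearA mat r c) ∧
    pvGood n m (pvClearA mat r c) (pvRemoveAt rows r c) (pvRemoveAt cols c r) ∧
    pvOcnt n m (pvClearA mat r c) + 1 = pvOcnt n m mat := by
  obtain ⟨hrl, hcl, hrows, hcols⟩ := hg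
  have hshape' := pvShape_clear hs hr0 hc0
  have hrmem : c ∈ rows.getD r.toNat [] := ((hrows r hr0 hrn).2 c).mpr ⟨hc0, hcm, hv⟩
  have hcmem : r ∈ cols.getD c.toNat [] := ((hcols c hc0 hcm).2 r).mpr ⟨hr0, hrn, hv⟩
  have hrowsEq := pvRemoveAt_eq hr0 hrmem
  have hcolsEq := pvRemoveAt_eq hc0 hcmem
  refine ⟨hshape', ⟨?_, ?_, ?_, ?_⟩, ?_⟩
  · rw [hrowsEq]; simpa using hrl
  · rw [hcolsEq]; simpa using hcl
  · intro r' hr'0 hr'n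
    rw [hrowsEq]
    rcases eq_or_ne r.toNat r'.toNat with heq | hne
    · have heqr : r' = r := by omega
      subst heqr
      rw [getD_set_self _ _ _ _ (by omega)]
      refine ⟨(hrows r' hr'0 hr'n).1.erase _, fun x => ?_⟩
      rw [(hrows r' hr'0 hr'n).1.mem_erase_iff]
      constructor
      · rintro ⟨hxc, hx⟩
        obtain ⟨h1, h2, h3⟩ := ((hrows r' hr'0 hr'n).2 x).mp hx
        exact ⟨h1, h2, by rwa [pvCellA_clear_ne hr0 hc0 hr'0 h1 (Or.inr hxc)]⟩
      · rintro ⟨h1, h2, h3⟩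
        rcases eq_or_ne x c with rfl | hxc
        · exact absurd (pvCellA_clear_same hs hr0 hrn hc0 hcm) h3
        · exact ⟨hxc, ((hrows r' hr'0 hr'n).2 x).mpr
            ⟨h1, h2, by rwa [← pvCellA_clear_ne hr0 hc0 hr'0 h1 (Or.inr hxc)]⟩⟩
    · have hner : r' ≠ r := by omega
      rw [getD_set_ne _ _ _ hne]
      refine ⟨(hrows r' hr'0 hr'n).1, fun x => ?_⟩
      rw [(hrows r' hr'0 hr'n).2 x]
      constructor
      · rintro ⟨h1, h2, h3⟩
        exact ⟨h1, h2, by rwa [pvCellA_clear_ne hr0 hc0 hr'0 h1 (Or.inl hner)]⟩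
      · rintro ⟨h1, h2, h3⟩
        exact ⟨h1, h2, by rwa [← pvCellA_clear_ne hr0 hc0 hr'0 h1 (Or.inl hner)]⟩
  · intro c' hc'0 hc'm
    rw [hcolsEq]
    rcases eq_or_ne c.toNat c'.toNat with heq | hne
    · have heqc : c' = c := by omega
      subst heqc
      rw [getD_set_self _ _ _ _ (by omega)]
      refine ⟨(hcols c' hc'0 hc'm).1.erase _, fun x => ?_⟩
      rw [(hcols c' hc'0 hc'm).1.mem_erase_iff]
      constructor
      · rintro ⟨hxr, hx⟩
        obtain ⟨h1, h2, h3⟩ := ((hcols c' hc'0 hc'm).2 x).mp hx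
        exact ⟨h1, h2, by rwa [pvCellA_clear_ne hr0 hc0 h1 hc'0 (Or.inl hxr)]⟩
      · rintro ⟨h1, h2, h3⟩
        rcases eq_or_ne x r with rfl | hxr
        · exact absurd (pvCellA_clear_same hs hr0 hrn hc0 hcm) h3
        · exact ⟨hxr, ((hcols c' hc'0 hc'm).2 x).mpr
            ⟨h1, h2, by rwa [← pvCellA_clear_ne hr0 hc0 h1 hc'0 (Or.inl hxr)]⟩⟩
    · have hnec : c' ≠ c := by omega
      rw [getD_set_ne _ _ _ hne]
      refine ⟨(hcols c' hc'0 hc'm).1, fun x => ?_⟩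
      rw [(hcols c' hc'0 hc'm).2 x]
      constructor
      · rintro ⟨h1, h2, h3⟩
        exact ⟨h1, h2, by rwa [pvCellA_clear_ne hr0 hc0 h1 hc'0 (Or.inr hnec)]⟩
      · rintro ⟨h1, h2, h3⟩
        exact ⟨h1, h2, by rwa [← pvCellA_clear_ne hr0 hc0 h1 hc'0 (Or.inr hnec)]⟩
  · have hiN : r.toNat < n.toNat := by omega
    have hjM : c.toNat < m.toNat := by omega
    have hcast_r : (r.toNat : Int) = r := Int.toNat_of_nonneg hr0
    have hcast_c : (c.toNat : Int) = c := Int.toNat_of_nonneg hc0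
    have houter := fun (mt : List (List Int)) =>
      (Finset.add_sum_erase (Finset.range n.toNat)
        (fun i => ∑ j ∈ Finset.range m.toNat,
          (if pvCellA mt (i : Int) (j : Int) ≠ 0 then 1 else 0))
        (Finset.mem_range.mpr hiN)).symm
    have hinner := fun (mt : List (List Int)) =>
      (Finset.add_sum_erase (Finset.range m.toNat)
        (fun j => if pvCellA mt (r.toNat : Int) (j : Int) ≠ 0 then 1 else 0)
        (Finset.mem_range.mpr hjM)).symm
    rw [pvOcnt, pvOcnt, houter mat, houter (pvClearA mat r c), hinner mat,
      hinner (pvClearA mat r c)]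
    have hv0 : pvCellA (pvClearA mat r c) (r.toNat : Int) (c.toNat : Int) = 0 := by
      rw [hcast_r, hcast_c]; exact pvCellA_clear_same hs hr0 hrn hc0 hcm
    have hv1 : pvCellA mat (r.toNat : Int) (c.toNat : Int) ≠ 0 := by
      rw [hcast_r, hcast_c]; exact hv
    rw [if_pos hv1, if_neg (not_not_intro hv0)]
    have hrest_inner : (∑ j ∈ (Finset.range m.toNat).erase c.toNat,
          (if pvCellA (pvClearA mat r c) (r.toNat : Int) (j : Int) ≠ 0 then 1 else 0))
        = ∑ j ∈ (Finset.range m.toNat).erase c.toNat,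
          (if pvCellA mat (r.toNat : Int) (j : Int) ≠ 0 then 1 else 0) := by
      refine Finset.sum_congr rfl fun j hj => ?_
      have hj' := (Finset.mem_erase.mp hj).1
      rw [pvCellA_clear_ne hr0 hc0 (Int.natCast_nonneg _) (Int.natCast_nonneg _)
        (Or.inr (by omega))]
    have hrest_outer : (∑ i ∈ (Finset.range n.toNat).erase r.toNat,
          ∑ j ∈ Finset.range m.toNat,
            (if pvCellA (pvClearA mat r c) (i : Int) (j : Int) ≠ 0 then 1 else 0))
        = ∑ i ∈ (Finset.range n.toNat).erase r.toNat,
          ∑ j ∈ Finset.range m.toNat,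
            (if pvCellA mat (i : Int) (j : Int) ≠ 0 then 1 else 0) := by
      refine Finset.sum_congr rfl fun i hi => Finset.sum_congr rfl fun j hj => ?_
      have hi' := (Finset.mem_erase.mp hi).1
      rw [pvCellA_clear_ne hr0 hc0 (Int.natCast_nonneg _) (Int.natCast_nonneg _)
        (Or.inl (by omega))]
    rw [hrest_inner, hrest_outer]
    omega

lemma pvOcnt_le (n m : Int) (mat : List (List Int)) :
    pvOcnt n m mat ≤ n.toNat * m.toNat := by
  rw [pvOcnt]
  calc ∑ i ∈ Finset.range n.toNat, ∑ j ∈ Finset.range m.toNat,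
        (if pvCellA mat (i : Int) (j : Int) ≠ 0 then 1 else 0)
      ≤ ∑ _i ∈ Finset.range n.toNat, m.toNat := by
        refine Finset.sum_le_sum fun i _ => ?_
        calc ∑ j ∈ Finset.range m.toNat, (if pvCellA mat (i : Int) (j : Int) ≠ 0 then 1 else 0)
            ≤ ∑ _j ∈ Finset.range m.toNat, 1 :=
              Finset.sum_le_sum fun j _ => by split <;> omega
          _ = m.toNat := by simp
    _ = n.toNat * m.toNat := by simp [Finset.sum_const, Finset.card_range]

-- ===== straight-run lemmas: one per direction =====

lemma pvRunRight {n m : Int} (mat : List (List Int)) {r : Int} (hr0 : 0 ≤ r) (hrn : r < n) :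
    ∀ (fuel : Nat) (c : Int), 0 ≤ c → c < m →
    (∀ x : Int, c < x → x < m → pvCellA mat r x = 0) →
    (m - c).toNat ≤ fuel →
    pvLoopA n m fuel r c r (c + 1) mat = [r, m - 1] := by
  intro fuel
  induction fuel with
  | zero => intro c hc0 hcm hz hf; exfalso; omega
  | succ fuel IH =>
    intro c hc0 hcm hz hf
    by_cases h1 : c + 1 < m
    · have hv := hz (c + 1) (by omega) h1
      have hstep : pvLoopA n m (fuel + 1) r c r (c + 1) mat
          = pvLoopA n m fuel r (c + 1) r (c + 1 + 1) mat := by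
        simp only [pvLoopA]
        rw [if_pos ⟨hr0, hrn, by omega, h1⟩]
        simp only [hv]; norm_num
      rw [hstep]
      exact IH (c + 1) (by omega) h1 (fun x hx1 hx2 => hz x (by omega) hx2) (by omega)
    · have hc : c = m - 1 := by omega
      simp only [pvLoopA]
      rw [if_neg (by rintro ⟨-, -, -, h⟩; omega), hc]

lemma pvHitRight {n m : Int} {mat : List (List Int)} {r c2 : Int} (hr0 : 0 ≤ r) (hrn : r < n)
    (hc2m : c2 < m) (hcell : pvCellA mat r c2 ≠ 0) :
    ∀ (fuel : Nat) (c : Int), 0 ≤ c → c < c2 →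
    (∀ x : Int, c < x → x < c2 → pvCellA mat r x = 0) →
    (c2 - c).toNat ≤ fuel →
    pvLoopA n m fuel r c r (c + 1) mat
      = pvLoopA n m (fuel - (c2 - c).toNat) r c2 (r + 1) c2 (pvClearA mat r c2) := by
  intro fuel
  induction fuel with
  | zero => intro c hc0 hcc2 hz hf; exfalso; omega
  | succ fuel IH =>
    intro c hc0 hcc2 hz hf
    by_cases h1 : c + 1 = c2
    · subst h1
      have harith : fuel + 1 - ((c + 1) - c).toNat = fuel := by omega
      rw [harith]
      simp only [pvLoopA]
      rw [if_pos ⟨hr0, hrn, by omega, by omega⟩]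
      norm_num [hcell]
    · have hv := hz (c + 1) (by omega) (by omega)
      have hstep : pvLoopA n m (fuel + 1) r c r (c + 1) mat
          = pvLoopA n m fuel r (c + 1) r (c + 1 + 1) mat := by
        simp only [pvLoopA]
        rw [if_pos ⟨hr0, hrn, by omega, by omega⟩]
        simp only [hv]; norm_num
      have harith : fuel + 1 - (c2 - c).toNat = fuel - (c2 - (c + 1)).toNat := by omega
      rw [harith, hstep]
      exact IH (c + 1) (by omega) (by omega) (fun x hx1 hx2 => hz x (by omega) hx2) (by omega)

lemma pvRunDown {n m : Int} (mat : List (List Int)) {c : Int} (hc0 : 0 ≤ c) (hcm : c < m) :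
    ∀ (fuel : Nat) (r : Int), 0 ≤ r → r < n →
    (∀ x : Int, r < x → x < n → pvCellA mat x c = 0) →
    (n - r).toNat ≤ fuel →
    pvLoopA n m fuel r c (r + 1) c mat = [n - 1, c] := by
  intro fuel
  induction fuel with
  | zero => intro r hr0 hrn hz hf; exfalso; omega
  | succ fuel IH =>
    intro r hr0 hrn hz hf
    by_cases h1 : r + 1 < n
    · have hv := hz (r + 1) (by omega) h1
      have hstep : pvLoopA n m (fuel + 1) r c (r + 1) c mat
          = pvLoopA n m fuel (r + 1) c (r + 1 + 1) c mat := by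
        simp only [pvLoopA]
        rw [if_pos ⟨by omega, h1, hc0, hcm⟩]
        simp only [hv]; norm_num
      rw [hstep]
      exact IH (r + 1) (by omega) h1 (fun x hx1 hx2 => hz x (by omega) hx2) (by omega)
    · have hr : r = n - 1 := by omega
      simp only [pvLoopA]
      rw [if_neg (by rintro ⟨-, h, -, -⟩; omega), hr]

lemma pvHitDown {n m : Int} {mat : List (List Int)} {c r2 : Int} (hc0 : 0 ≤ c) (hcm : c < m)
    (hr2n : r2 < n) (hcell : pvCellA mat r2 c ≠ 0) :
    ∀ (fuel : Nat) (r : Int), 0 ≤ r → r < r2 →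
    (∀ x : Int, r < x → x < r2 → pvCellA mat x c = 0) →
    (r2 - r).toNat ≤ fuel →
    pvLoopA n m fuel r c (r + 1) c mat
      = pvLoopA n m (fuel - (r2 - r).toNat) r2 c r2 (c - 1) (pvClearA mat r2 c) := by
  intro fuel
  induction fuel with
  | zero => intro r hr0 hrr2 hz hf; exfalso; omega
  | succ fuel IH =>
    intro r hr0 hrr2 hz hf
    by_cases h1 : r + 1 = r2
    · subst h1
      have harith : fuel + 1 - ((r + 1) - r).toNat = fuel := by omega
      rw [harith]
      simp only [pvLoopA]
      rw [if_pos ⟨by omega, by omega, hc0, hcm⟩]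
      norm_num [hcell]
    · have hv := hz (r + 1) (by omega) (by omega)
      have hstep : pvLoopA n m (fuel + 1) r c (r + 1) c mat
          = pvLoopA n m fuel (r + 1) c (r + 1 + 1) c mat := by
        simp only [pvLoopA]
        rw [if_pos ⟨by omega, by omega, hc0, hcm⟩]
        simp only [hv]; norm_num
      have harith : fuel + 1 - (r2 - r).toNat = fuel - (r2 - (r + 1)).toNat := by omega
      rw [harith, hstep]
      exact IH (r + 1) (by omega) (by omega) (fun x hx1 hx2 => hz x (by omega) hx2) (by omega)

lemma pvRunLeft {n m : Int} (mat : List (List Int)) {r : Int} (hr0 : 0 ≤ r) (hrn : r < n) :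
    ∀ (fuel : Nat) (c : Int), 0 ≤ c → c < m →
    (∀ x : Int, 0 ≤ x → x < c → pvCellA mat r x = 0) →
    (c + 1).toNat ≤ fuel →
    pvLoopA n m fuel r c r (c - 1) mat = [r, 0] := by
  intro fuel
  induction fuel with
  | zero => intro c hc0 hcm hz hf; exfalso; omega
  | succ fuel IH =>
    intro c hc0 hcm hz hf
    by_cases h1 : 0 ≤ c - 1
    · have hv := hz (c - 1) h1 (by omega)
      have hstep : pvLoopA n m (fuel + 1) r c r (c - 1) mat
          = pvLoopA n m fuel r (c - 1) r (c - 1 - 1) mat := by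
        simp only [pvLoopA]
        rw [if_pos ⟨hr0, hrn, h1, by omega⟩]
        simp only [hv]; norm_num
      rw [hstep]
      exact IH (c - 1) h1 (by omega) (fun x hx1 hx2 => hz x hx1 (by omega)) (by omega)
    · have hc : c = 0 := by omega
      simp only [pvLoopA]
      rw [if_neg (by rintro ⟨-, -, h, -⟩; omega), hc]

lemma pvHitLeft {n m : Int} {mat : List (List Int)} {r c2 : Int} (hr0 : 0 ≤ r) (hrn : r < n)
    (hc20 : 0 ≤ c2) (hcell : pvCellA mat r c2 ≠ 0) :
    ∀ (fuel : Nat) (c : Int), c < m → c2 < c →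
    (∀ x : Int, c2 < x → x < c → pvCellA mat r x = 0) →
    (c - c2).toNat ≤ fuel →
    pvLoopA n m fuel r c r (c - 1) mat
      = pvLoopA n m (fuel - (c - c2).toNat) r c2 (r - 1) c2 (pvClearA mat r c2) := by
  intro fuel
  induction fuel with
  | zero => intro c hcm hc2c hz hf; exfalso; omega
  | succ fuel IH =>
    intro c hcm hc2c hz hf
    by_cases h1 : c - 1 = c2
    · subst h1
      have harith : fuel + 1 - (c - (c - 1)).toNat = fuel := by omega
      rw [harith]
      simp only [pvLoopA]
      rw [if_pos ⟨hr0, hrn, by omega, by omega⟩]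
      norm_num [hcell]
    · have hv := hz (c - 1) (by omega) (by omega)
      have hstep : pvLoopA n m (fuel + 1) r c r (c - 1) mat
          = pvLoopA n m fuel r (c - 1) r (c - 1 - 1) mat := by
        simp only [pvLoopA]
        rw [if_pos ⟨hr0, hrn, by omega, by omega⟩]
        simp only [hv]; norm_num
      have harith : fuel + 1 - (c - c2).toNat = fuel - ((c - 1) - c2).toNat := by omega
      rw [harith, hstep]
      exact IH (c - 1) (by omega) (by omega) (fun x hx1 hx2 => hz x hx1 (by omega)) (by omega)

lemma pvRunUp {n m : Int} (mat : List (List Int)) {c : Int} (hc0 : 0 ≤ c) (hcm : c < m) :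
    ∀ (fuel : Nat) (r : Int), 0 ≤ r → r < n →
    (∀ x : Int, 0 ≤ x → x < r → pvCellA mat x c = 0) →
    (r + 1).toNat ≤ fuel →
    pvLoopA n m fuel r c (r - 1) c mat = [0, c] := by
  intro fuel
  induction fuel with
  | zero => intro r hr0 hrn hz hf; exfalso; omega
  | succ fuel IH =>
    intro r hr0 hrn hz hf
    by_cases h1 : 0 ≤ r - 1
    · have hv := hz (r - 1) h1 (by omega)
      have hstep : pvLoopA n m (fuel + 1) r c (r - 1) c mat
          = pvLoopA n m fuel (r - 1) c (r - 1 - 1) c mat := by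
        simp only [pvLoopA]
        rw [if_pos ⟨h1, by omega, hc0, hcm⟩]
        simp only [hv]; norm_num
      rw [hstep]
      exact IH (r - 1) h1 (by omega) (fun x hx1 hx2 => hz x hx1 (by omega)) (by omega)
    · have hr : r = 0 := by omega
      simp only [pvLoopA]
      rw [if_neg (by rintro ⟨h, -, -, -⟩; omega), hr]

lemma pvHitUp {n m : Int} {mat : List (List Int)} {c r2 : Int} (hc0 : 0 ≤ c) (hcm : c < m)
    (hr20 : 0 ≤ r2) (hcell : pvCellA mat r2 c ≠ 0) :
    ∀ (fuel : Nat) (r : Int), r < n → r2 < r →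
    (∀ x : Int, r2 < x → x < r → pvCellA mat x c = 0) →
    (r - r2).toNat ≤ fuel →
    pvLoopA n m fuel r c (r - 1) c mat
      = pvLoopA n m (fuel - (r - r2).toNat) r2 c r2 (c + 1) (pvClearA mat r2 c) := by
  intro fuel
  induction fuel with
  | zero => intro r hrn hr2r hz hf; exfalso; omega
  | succ fuel IH =>
    intro r hrn hr2r hz hf
    by_cases h1 : r - 1 = r2
    · subst h1
      have harith : fuel + 1 - (r - (r - 1)).toNat = fuel := by omega
      rw [harith]
      simp only [pvLoopA]
      rw [if_pos ⟨by omega, by omega, hc0, hcm⟩]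
      norm_num [hcell]
    · have hv := hz (r - 1) (by omega) (by omega)
      have hstep : pvLoopA n m (fuel + 1) r c (r - 1) c mat
          = pvLoopA n m fuel (r - 1) c (r - 1 - 1) c mat := by
        simp only [pvLoopA]
        rw [if_pos ⟨by omega, by omega, hc0, hcm⟩]
        simp only [hv]; norm_num
      have harith : fuel + 1 - (r - r2).toNat = fuel - ((r - 1) - r2).toNat := by omega
      rw [harith, hstep]
      exact IH (r - 1) (by omega) (by omega) (fun x hx1 hx2 => hz x hx1 (by omega)) (by omega)

-- ===== the main equivalence of the two loops =====

lemma pvFuelStep {k S seg fuelA : Nat} (h : (k + 1) * S ≤ fuelA) (hseg : seg ≤ S)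
    (hk : 1 ≤ k) : (k - 1 + 1) * S ≤ fuelA - seg := by
  have e2 : k - 1 + 1 = k := by omega
  rw [e2]
  have h2 : k * S + S ≤ fuelA := by nlinarith
  omega

lemma pvFuelOne {k S fuelA : Nat} (h : (k + 1) * S ≤ fuelA) : S ≤ fuelA := by
  have h1 : S ≤ (k + 1) * S := Nat.le_mul_of_pos_left _ (by omega)
  omega

lemma pvLoopB_step0 (n m : Int) (fb : Nat) (r c : Int) (rows cols : List (List Int)) :
    pvLoopB n m (fb + 1) r c 0 rows cols
      = match pvMinAbove (PySem.List.pyGetD rows r []) c with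
        | none => [r, m - 1]
        | some nxt => pvLoopB n m fb r nxt 1 (pvRemoveAt rows r nxt) (pvRemoveAt cols nxt r) := rfl

lemma pvLoopB_step1 (n m : Int) (fb : Nat) (r c : Int) (rows cols : List (List Int)) :
    pvLoopB n m (fb + 1) r c 1 rows cols
      = match pvMinAbove (PySem.List.pyGetD cols c []) r with
        | none => [n - 1, c]
        | some nxt => pvLoopB n m fb nxt c 2 (pvRemoveAt rows nxt c) (pvRemoveAt cols c nxt) := rfl

lemma pvLoopB_step2 (n m : Int) (fb : Nat) (r c : Int) (rows cols : List (List Int)) :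
    pvLoopB n m (fb + 1) r c 2 rows cols
      = match pvMaxBelow (PySem.List.pyGetD rows r []) c with
        | none => [r, 0]
        | some nxt => pvLoopB n m fb r nxt 3 (pvRemoveAt rows r nxt) (pvRemoveAt cols nxt r) := rfl

lemma pvLoopB_step3 (n m : Int) (fb : Nat) (r c : Int) (rows cols : List (List Int)) :
    pvLoopB n m (fb + 1) r c 3 rows cols
      = match pvMaxBelow (PySem.List.pyGetD cols c []) r with
        | none => [0, c]
        | some nxt => pvLoopB n m fb nxt c 0 (pvRemoveAt rows nxt c) (pvRemoveAt cols c nxt) := rfl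

lemma pvMain (n m : Int) :
    ∀ (k : Nat) (mat rows cols : List (List Int)) (r c d : Int) (fuelA fuelB : Nat),
    pvShape n m mat → pvGood n m mat rows cols →
    0 ≤ r → r < n → 0 ≤ c → c < m →
    (d = 0 ∨ d = 1 ∨ d = 2 ∨ d = 3) →
    pvOcnt n m mat = k →
    (k + 1) * (n.toNat + m.toNat + 1) ≤ fuelA → k < fuelB →
    pvLoopA n m fuelA r c (r + pvDr d) (c + pvDc d) mat = pvLoopB n m fuelB r c d rows cols := by
  intro k
  induction k using Nat.strong_induction_on with
  | _ k IH =>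
  intro mat rows cols r c d fuelA fuelB hs hg hr0 hrn hc0 hcm hd hk hfA hfB
  obtain ⟨fb, rfl⟩ : ∃ fb, fuelB = fb + 1 := ⟨fuelB - 1, by omega⟩
  have hgrows := hg.2.2.1
  have hgcols := hg.2.2.2
  have hSle := pvFuelOne hfA
  rcases hd with rfl | rfl | rfl | rfl
  · -- d = 0 : moving right along row r
    have eA : r + pvDr 0 = r := by simp [pvDr]
    have eB : c + pvDc 0 = c + 1 := by simp [pvDc]
    rw [eA, eB]
    rw [pvLoopB_step0, pvGetD_nonneg rows [] hr0]
    cases hmin : pvMinAbove (rows.getD r.toNat []) c with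
    | none =>
      have hnone := pvMinAbove_none hmin
      have hz : ∀ x : Int, c < x → x < m → pvCellA mat r x = 0 := by
        intro x hx1 hx2
        by_contra h3
        exact hnone x (((hgrows r hr0 hrn).2 x).mpr ⟨by omega, hx2, h3⟩) hx1
      exact pvRunRight mat hr0 hrn fuelA c hc0 hcm hz (by omega)
    | some c2 =>
      obtain ⟨hmem, hlt, hmin2⟩ := pvMinAbove_some hmin
      obtain ⟨hx0, hxm, hcell⟩ := ((hgrows r hr0 hrn).2 c2).mp hmem
      have hz : ∀ x : Int, c < x → x < c2 → pvCellA mat r x = 0 := by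
        intro x hx1 hx2
        by_contra h3
        have := hmin2 x (((hgrows r hr0 hrn).2 x).mpr ⟨by omega, by omega, h3⟩) hx1
        omega
      rw [pvHitRight hr0 hrn hxm hcell fuelA c hc0 hlt hz (by omega)]
      obtain ⟨hs', hg', hcnt⟩ := pvPreserve hs hg hr0 hrn hx0 hxm hcell
      have hkpos : 1 ≤ k := by omega
      have hIH := IH (k - 1) (by omega) (pvClearA mat r c2) (pvRemoveAt rows r c2)
        (pvRemoveAt cols c2 r) r c2 1 (fuelA - (c2 - c).toNat) fb hs' hg' hr0 hrn hx0 hxm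
        (by norm_num) (by omega) (pvFuelStep hfA (by omega) hkpos) (by omega)
      simp only [pvDr, pvDc] at hIH
      norm_num at hIH
      exact hIH
  · -- d = 1 : moving down along column c
    have eA : r + pvDr 1 = r + 1 := by norm_num [pvDr]
    have eB : c + pvDc 1 = c := by norm_num [pvDc]
    rw [eA, eB]
    rw [pvLoopB_step1, pvGetD_nonneg cols [] hc0]
    cases hmin : pvMinAbove (cols.getD c.toNat []) r with
    | none =>
      have hnone := pvMinAbove_none hmin
      have hz : ∀ x : Int, r < x → x < n → pvCellA mat x c = 0 := by
        intro x hx1 hx2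
        by_contra h3
        exact hnone x (((hgcols c hc0 hcm).2 x).mpr ⟨by omega, hx2, h3⟩) hx1
      exact pvRunDown mat hc0 hcm fuelA r hr0 hrn hz (by omega)
    | some r2 =>
      obtain ⟨hmem, hlt, hmin2⟩ := pvMinAbove_some hmin
      obtain ⟨hx0, hxn, hcell⟩ := ((hgcols c hc0 hcm).2 r2).mp hmem
      have hz : ∀ x : Int, r < x → x < r2 → pvCellA mat x c = 0 := by
        intro x hx1 hx2
        by_contra h3
        have := hmin2 x (((hgcols c hc0 hcm).2 x).mpr ⟨by omega, by omega, h3⟩) hx1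
        omega
      rw [pvHitDown hc0 hcm hxn hcell fuelA r hr0 hlt hz (by omega)]
      obtain ⟨hs', hg', hcnt⟩ := pvPreserve hs hg hx0 hxn hc0 hcm hcell
      have hkpos : 1 ≤ k := by omega
      have hIH := IH (k - 1) (by omega) (pvClearA mat r2 c) (pvRemoveAt rows r2 c)
        (pvRemoveAt cols c r2) r2 c 2 (fuelA - (r2 - r).toNat) fb hs' hg' hx0 hxn hc0 hcm
        (by norm_num) (by omega) (pvFuelStep hfA (by omega) hkpos) (by omega)
      simp only [pvDr, pvDc] at hIH
      norm_num at hIH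
      exact hIH
  · -- d = 2 : moving left along row r
    have eA : r + pvDr 2 = r := by norm_num [pvDr]
    have eB : c + pvDc 2 = c - 1 := by norm_num [pvDc]; ring
    rw [eA, eB]
    rw [pvLoopB_step2, pvGetD_nonneg rows [] hr0]
    cases hmax : pvMaxBelow (rows.getD r.toNat []) c with
    | none =>
      have hnone := pvMaxBelow_none hmax
      have hz : ∀ x : Int, 0 ≤ x → x < c → pvCellA mat r x = 0 := by
        intro x hx1 hx2
        by_contra h3
        exact hnone x (((hgrows r hr0 hrn).2 x).mpr ⟨hx1, by omega, h3⟩) hx2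
      exact pvRunLeft mat hr0 hrn fuelA c hc0 hcm hz (by omega)
    | some c2 =>
      obtain ⟨hmem, hlt, hmax2⟩ := pvMaxBelow_some hmax
      obtain ⟨hx0, hxm, hcell⟩ := ((hgrows r hr0 hrn).2 c2).mp hmem
      have hz : ∀ x : Int, c2 < x → x < c → pvCellA mat r x = 0 := by
        intro x hx1 hx2
        by_contra h3
        have := hmax2 x (((hgrows r hr0 hrn).2 x).mpr ⟨by omega, by omega, h3⟩) hx2
        omega
      rw [pvHitLeft hr0 hrn hx0 hcell fuelA c hcm hlt hz (by omega)]
      obtain ⟨hs', hg', hcnt⟩ := pvPreserve hs hg hr0 hrn hx0 hxm hcell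
      have hkpos : 1 ≤ k := by omega
      have hIH := IH (k - 1) (by omega) (pvClearA mat r c2) (pvRemoveAt rows r c2)
        (pvRemoveAt cols c2 r) r c2 3 (fuelA - (c - c2).toNat) fb hs' hg' hr0 hrn hx0 hxm
        (by norm_num) (by omega) (pvFuelStep hfA (by omega) hkpos) (by omega)
      simp only [pvDr, pvDc] at hIH
      norm_num at hIH
      exact hIH
  · -- d = 3 : moving up along column c
    have eA : r + pvDr 3 = r - 1 := by norm_num [pvDr]; ring
    have eB : c + pvDc 3 = c := by norm_num [pvDc]
    rw [eA, eB]
    rw [pvLoopB_step3, pvGetD_nonneg cols [] hc0]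
    cases hmax : pvMaxBelow (cols.getD c.toNat []) r with
    | none =>
      have hnone := pvMaxBelow_none hmax
      have hz : ∀ x : Int, 0 ≤ x → x < r → pvCellA mat x c = 0 := by
        intro x hx1 hx2
        by_contra h3
        exact hnone x (((hgcols c hc0 hcm).2 x).mpr ⟨hx1, by omega, h3⟩) hx2
      exact pvRunUp mat hc0 hcm fuelA r hr0 hrn hz (by omega)
    | some r2 =>
      obtain ⟨hmem, hlt, hmax2⟩ := pvMaxBelow_some hmax
      obtain ⟨hx0, hxn, hcell⟩ := ((hgcols c hc0 hcm).2 r2).mp hmem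
      have hz : ∀ x : Int, r2 < x → x < r → pvCellA mat x c = 0 := by
        intro x hx1 hx2
        by_contra h3
        have := hmax2 x (((hgcols c hc0 hcm).2 x).mpr ⟨by omega, by omega, h3⟩) hx2
        omega
      rw [pvHitUp hc0 hcm hx0 hcell fuelA r hrn hlt hz (by omega)]
      obtain ⟨hs', hg', hcnt⟩ := pvPreserve hs hg hx0 hxn hc0 hcm hcell
      have hkpos : 1 ≤ k := by omega
      have hIH := IH (k - 1) (by omega) (pvClearA mat r2 c) (pvRemoveAt rows r2 c)
        (pvRemoveAt cols c r2) r2 c 0 (fuelA - (r - r2).toNat) fb hs' hg' hx0 hxn hc0 hcm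
        (by norm_num) (by omega) (pvFuelStep hfA (by omega) hkpos) (by omega)
      simp only [pvDr, pvDc] at hIH
      norm_num at hIH
      exact hIH

lemma getD_map_pyRange_int (g : Int → List Int) (n : Int) {r : Int} (h0 : 0 ≤ r) (hn : r < n) :
    (((PySem.List.pyRange 0 n 1).map g).getD r.toNat []) = g r := by
  rw [List.getD_eq_getElem?_getD, List.getElem?_map, PySem.List.getElem?_pyRange_one]
  rw [if_pos (by omega)]
  simp [Int.toNat_of_nonneg h0]

lemma pvInitGood (n m : Int) (mat : List (List Int)) :
    pvGood n m mat
      ((PySem.List.pyRange 0 n 1).map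
        (fun r => (PySem.List.pyRange 0 m 1).filter (fun c => decide (pvCellA mat r c ≠ 0))))
      ((PySem.List.pyRange 0 m 1).map
        (fun c => (PySem.List.pyRange 0 n 1).filter (fun r => decide (pvCellA mat r c ≠ 0)))) := by
  refine ⟨by simp [PySem.List.length_pyRange_one], by simp [PySem.List.length_pyRange_one],
    fun r hr0 hrn => ?_, fun c hc0 hcm => ?_⟩
  · rw [getD_map_pyRange_int _ n hr0 hrn]
    refine ⟨(PySem.List.nodup_pyRange_one 0 m).filter _, fun x => ?_⟩
    rw [List.mem_filter, PySem.List.mem_pyRange_one]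
    simp; tauto
  · rw [getD_map_pyRange_int _ m hc0 hcm]
    refine ⟨(PySem.List.nodup_pyRange_one 0 n).filter _, fun x => ?_⟩
    rw [List.mem_filter, PySem.List.mem_pyRange_one]
    simp; tauto

-- ===== VERDICT (by name: the statement is the Claim_ definition above) =====
theorem FindExitPoint_spec : Claim_equal_FindExitPoint := by
  intro n m matrix hdom hpre
  show FindExitPoint n m matrix = FindExitPoint_alt n m matrix
  by_cases htriv : n ≤ 0 ∨ m ≤ 0
  · have hpos : 0 < pvFuelA n m := by rw [pvFuelA]; positivity
    obtain ⟨f, hf⟩ : ∃ f, pvFuelA n m = f + 1 := ⟨pvFuelA n m - 1, by omega⟩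
    rw [FindExitPoint, FindExitPoint_alt, hf, if_pos htriv]
    simp only [pvLoopA]
    rw [if_neg (by rintro ⟨-, h1, -, h2⟩; omega)]
  · have hn : 0 < n := by omega
    have hm : 0 < m := by omega
    obtain ⟨hlen, hrowlen⟩ := hpre hn hm
    have hs : pvShape n m matrix := by
      refine ⟨by omega, fun i hi => ?_⟩
      have hi' : i < matrix.length := by omega
      have hgel : (matrix.take n.toNat)[i]'(by rw [List.length_take]; omega)
          = matrix.getD i [] := by
        simp [List.getElem_take, List.getD_eq_getElem?_getD, List.getElem?_eq_getElem hi']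
      have hmem : matrix.getD i [] ∈ matrix.take n.toNat := hgel ▸ List.getElem_mem _
      have := hrowlen _ hmem
      omega
    have hg := pvInitGood n m matrix
    have hK := pvOcnt_le n m matrix
    have hpos : 0 < pvFuelA n m := by rw [pvFuelA]; positivity
    obtain ⟨f, hf⟩ : ∃ f, pvFuelA n m = f + 1 := ⟨pvFuelA n m - 1, by omega⟩
    have hfA : (pvOcnt n m matrix + 1) * (n.toNat + m.toNat + 1) + 1 ≤ pvFuelA n m := by
      rw [pvFuelA]; nlinarith [hK]
    rw [FindExitPoint, FindExitPoint_alt, if_neg (by rintro (h | h) <;> omega), hf]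
    simp only [pvLoopA]
    rw [if_pos ⟨le_refl 0, hn, le_refl 0, hm⟩]
    by_cases hv0 : pvCellA matrix 0 0 = 0
    · have hM := pvMain n m (pvOcnt n m matrix) matrix _ _ 0 0 0 f (n.toNat * m.toNat + 1)
        hs hg (le_refl 0) hn (le_refl 0) hm (by norm_num) rfl (by omega) (by omega)
      simp only [pvDr, pvDc] at hM
      norm_num at hM
      norm_num [hv0]
      exact hM
    · obtain ⟨hs', hg', hcnt⟩ := pvPreserve hs hg (le_refl 0) hn (le_refl 0) hm hv0
      have hfA' : (pvOcnt n m matrix - 1 + 1) * (n.toNat + m.toNat + 1) ≤ f := by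
        have e : pvOcnt n m matrix - 1 + 1 = pvOcnt n m matrix := by omega
        rw [e]
        have h2 : (pvOcnt n m matrix + 1) * (n.toNat + m.toNat + 1) ≤ f := by omega
        nlinarith
      by_cases hv1 : pvCellA matrix 0 0 = 1
      · have hM := pvMain n m (pvOcnt n m matrix - 1) (pvClearA matrix 0 0) _ _ 0 0 1 f
          (n.toNat * m.toNat + 1) hs' hg' (le_refl 0) hn (le_refl 0) hm (by norm_num)
          (by omega) hfA' (by omega)
        simp only [pvDr, pvDc] at hM
        norm_num at hM
        norm_num [hv0, hv1]
        exact hM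
      · have hM := pvMain n m (pvOcnt n m matrix - 1) (pvClearA matrix 0 0) _ _ 0 0 0 f
          (n.toNat * m.toNat + 1) hs' hg' (le_refl 0) hn (le_refl 0) hm (by norm_num)
          (by omega) hfA' (by omega)
        simp only [pvDr, pvDc] at hM
        norm_num at hM
        norm_num [hv0, hv1]
        exact hM
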